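-- pv_equiv track=rewrite | github.com/aerim-choi/CodingTest | 프로그래머스/0/120864. 숨어있는 숫자의 덧셈 （2）/숨어있는 숫자의 덧셈 （2）.py | solution
-- ===== SOURCE A (Python) =====
-- def solution(my_string):
--
--     result = 0
--     num = ''
--     for ch in my_string:
--         if ch.isdigit():
--             num+=ch
--
--         else :
--             if num=='':
--                 continue
--             else:
--                 result+=int(num)
--                 num=''
--
--
--     if num.isdigit():
--         result+=int(num)
--
--     return result
-- ===== SOURCE B (Python) =====
-- def solution(my_string):
--     # Two-pointer scan: jump over each maximal digit run at once instead of
--     # accumulating characters one by one into a buffer string.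
--     total = 0
--     i = 0
--     n = len(my_string)
--     while i < n:
--         if my_string[i].isdigit():
--             j = i
--             while j < n and my_string[j].isdigit():
--                 j += 1
--             total += int(my_string[i:j])
--             i = j
--         else:
--             i += 1
--     return total
-- ===== Notes on version B (the rewrite author's own statement) =====
-- stated objective: alternative
-- what changed: Replaces A's character-accumulator state machine (buffer string grown char by char, flushed at non-digit boundaries and once more after the loop) with a two-pointer scan that locates each maximal digit run and converts the slice in one step, with no pending-buffer state or post-loop flush.
import Mathlib
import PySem

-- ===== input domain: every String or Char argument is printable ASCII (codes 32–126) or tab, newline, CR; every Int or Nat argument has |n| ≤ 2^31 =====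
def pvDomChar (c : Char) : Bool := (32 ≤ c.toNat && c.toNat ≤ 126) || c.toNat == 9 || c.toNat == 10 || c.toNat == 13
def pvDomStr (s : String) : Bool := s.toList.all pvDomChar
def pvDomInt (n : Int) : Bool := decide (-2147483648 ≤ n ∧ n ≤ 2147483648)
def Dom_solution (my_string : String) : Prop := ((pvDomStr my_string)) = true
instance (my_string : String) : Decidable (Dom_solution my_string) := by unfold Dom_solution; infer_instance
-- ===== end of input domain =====

-- B replaces A's char-by-char buffer state machine with a two-pointer scan over maximal
-- digit runs (objective: alternative decomposition, same O(n) cost).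

-- ===== PORT A =====
-- loop body: accumulate digits into num, flush int(num) into result at a non-digit
def solutionStep (st : Int × List Char) (ch : Char) : Int × List Char :=
  if PySem.Chars.isdigit ch then (st.1, st.2 ++ [ch])
  else if st.2 = [] then st
  else (st.1 + (PySem.Int.ofChars? st.2).getD 0, [])
  -- int(num): num is a run of chars with isdigit true, so on the ASCII domain
  -- ofChars? is some and the .getD 0 default is never taken

def solution (my_string : String) : Int :=
  let st := my_string.toList.foldl solutionStep (0, [])
  if PySem.Chars.strIsdigit st.2 then st.1 + (PySem.Int.ofChars? st.2).getD 0 else st.1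

-- ===== PORT B =====
-- two-pointer scan: at a digit, take the whole maximal digit run (the inner while loop),
-- convert it in one int() call, and jump past it
def solutionGo (total : Int) : List Char → Int
  | [] => total
  | c :: rest =>
    if PySem.Chars.isdigit c then
      let run := (c :: rest).takeWhile PySem.Chars.isdigit
      solutionGo (total + (PySem.Int.ofChars? run).getD 0) ((c :: rest).drop run.length)
    else solutionGo total rest
termination_by cs => cs.length
decreasing_by
  · simp [*]
  · simp

def solution_alt (my_string : String) : Int := solutionGo 0 my_string.toList

-- ===== PRECONDITION & SPEC =====
def Spec_solution (my_string : String) (out : Int) : Prop := out = solution_alt my_string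
instance (my_string : String) (out : Int) : Decidable (Spec_solution my_string out) := by unfold Spec_solution; infer_instance

-- ===== CLAIM (what is proved, stated in full; the proofs are below) =====
def Claim_equal_solution : Prop := ∀ (my_string : String), Dom_solution my_string → Spec_solution my_string (solution my_string)

-- ===== LEMMAS AND PROOFS =====

def pvFinish (st : Int × List Char) : Int :=
  if PySem.Chars.strIsdigit st.2 then st.1 + (PySem.Int.ofChars? st.2).getD 0 else st.1

lemma takeWhile_append_of_neg {p : Char → Bool} {c : Char} (num cs : List Char)
    (hnum : ∀ x ∈ num, p x = true) (hc : p c = false) :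
    (num ++ c :: cs).takeWhile p = num := by
  induction num with
  | nil => simp [hc]
  | cons d num ih =>
    have hd := hnum d (by simp)
    simp [hd, ih (fun x hx => hnum x (by simp [hx]))]

lemma strIsdigit_of_all {num : List Char} (hne : num ≠ [])
    (h : ∀ x ∈ num, PySem.Chars.isdigit x = true) :
    PySem.Chars.strIsdigit num = true := by
  simp [PySem.Chars.strIsdigit, hne, List.all_eq_true.mpr h]

lemma go_eq (cs : List Char) : ∀ (r : Int) (num : List Char),
    (∀ x ∈ num, PySem.Chars.isdigit x = true) →
    pvFinish (cs.foldl solutionStep (r, num)) = solutionGo r (num ++ cs) := by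
  induction cs with
  | nil =>
    intro r num hnum
    cases num with
    | nil => simp [pvFinish, PySem.Chars.strIsdigit, solutionGo]
    | cons d num' =>
      have hd := hnum d (by simp)
      have hall : (d :: num').takeWhile PySem.Chars.isdigit = d :: num' :=
        List.takeWhile_eq_self_iff.mpr hnum
      simp only [List.foldl_nil, List.append_nil, pvFinish,
        strIsdigit_of_all (by simp) hnum]
      rw [solutionGo]
      simp [hd, hall, solutionGo]
  | cons c cs ih =>
    intro r num hnum
    by_cases hc : PySem.Chars.isdigit c = true
    · have : (num ++ c :: cs) = (num ++ [c]) ++ cs := by simp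
      rw [this, List.foldl_cons]
      have := ih r (num ++ [c]) (by intro x hx; rcases List.mem_append.mp hx with h | h
                                    · exact hnum x h
                                    · simp at h; subst h; exact hc)
      rw [← this]
      simp [solutionStep, hc]
    · have hc' : PySem.Chars.isdigit c = false := by simpa using hc
      cases num with
      | nil =>
        rw [List.foldl_cons]
        have hstep : solutionStep (r, ([] : List Char)) c = (r, []) := by
          simp [solutionStep, hc']
        rw [hstep, ih r [] (by simp)]
        simp [solutionGo, hc']
      | cons d num' =>
        have hd := hnum d (by simp)
        rw [List.foldl_cons]
        have hstep : solutionStep (r, d :: num') c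
            = (r + (PySem.Int.ofChars? (d :: num')).getD 0, []) := by
          simp [solutionStep, hc']
        rw [hstep, ih _ [] (by simp)]
        have htw : ((d :: num') ++ c :: cs).takeWhile PySem.Chars.isdigit = d :: num' :=
          takeWhile_append_of_neg _ _ hnum hc'
        conv_rhs => rw [List.cons_append, solutionGo]
        simp only [← List.cons_append, hd, if_pos, htw]
        rw [show ((d :: num') ++ c :: cs).drop (d :: num').length = c :: cs from
          List.drop_left]
        rw [solutionGo]
        simp [hc']

-- ===== VERDICT (by name: the statement is the Claim_ definition above) =====
theorem solution_spec : Claim_equal_solution := by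
  intro s _
  show solution s = solution_alt s
  have := go_eq s.toList 0 [] (by simp)
  simpa [solution, solution_alt, pvFinish] using this
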